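-- pv_equiv track=rewrite | github.com/LevaniSamosnidze/codewars-exam | Prime time .py | prime_time
-- ===== SOURCE A (Python) =====
-- def prime_time(num):
--     result = []
--     if num > 2:
--         result.append(2)
--     if num > 3:
--         result.append(3)
--     for num in range(2, num + 1):
--         if num % 2 != 0 and num % 3 != 0:
--             result.append(num)
--     return result
-- ===== SOURCE B (Python) =====
-- def prime_time(num):
--     result = []
--     if num > 2:
--         result.append(2)
--     if num > 3:
--         result.append(3)
--     k = 1
--     while 6 * k - 1 <= num:
--         result.append(6 * k - 1)
--         if 6 * k + 1 <= num:
--             result.append(6 * k + 1)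
--         k += 1
--     return result
-- ===== Notes on version B (the rewrite author's own statement) =====
-- stated objective: alternative
-- what changed: Instead of scanning every integer up to num with two modulo tests, B strides over blocks of six, emitting the two coprime residues of each block directly with no divisibility tests.
import Mathlib
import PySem

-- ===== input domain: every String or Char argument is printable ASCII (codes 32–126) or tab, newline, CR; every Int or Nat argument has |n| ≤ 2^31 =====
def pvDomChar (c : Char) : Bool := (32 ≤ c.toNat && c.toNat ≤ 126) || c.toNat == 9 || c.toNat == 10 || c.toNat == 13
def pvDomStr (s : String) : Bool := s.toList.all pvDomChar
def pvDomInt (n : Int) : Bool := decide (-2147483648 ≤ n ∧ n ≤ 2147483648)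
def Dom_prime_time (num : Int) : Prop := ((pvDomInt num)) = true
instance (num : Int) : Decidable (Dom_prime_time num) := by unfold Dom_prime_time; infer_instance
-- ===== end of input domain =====

-- B replaces the per-integer double-modulo scan by striding over six-number
-- blocks, emitting 6k-1 and 6k+1 directly (same prefix 2, 3); same output.

-- ===== PORT A =====
def prime_time (num : Int) : List Int :=
  let result : List Int := []
  let result := if num > 2 then result ++ [2] else result
  let result := if num > 3 then result ++ [3] else result
  (PySem.List.pyRange 2 (num + 1) 1).foldl
    (fun acc n => if PySem.Int.mod n 2 ≠ 0 ∧ PySem.Int.mod n 3 ≠ 0 then acc ++ [n] else acc)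
    result

-- ===== PORT B =====
-- the 'while 6*k-1 <= num' loop of Source B, with its accumulator
def primeLoop (num k : Int) (acc : List Int) : List Int :=
  if 6 * k - 1 ≤ num then
    primeLoop num (k + 1)
      ((acc ++ [6 * k - 1]) ++ (if 6 * k + 1 ≤ num then [6 * k + 1] else []))
  else acc
termination_by (num + 2 - 6 * k).toNat
decreasing_by omega

def prime_time_alt (num : Int) : List Int :=
  let result : List Int := []
  let result := if num > 2 then result ++ [2] else result
  let result := if num > 3 then result ++ [3] else result
  primeLoop num 1 result

-- ===== PRECONDITION & SPEC =====
def Spec_prime_time (num : Int) (out : List Int) : Prop := out = prime_time_alt num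
instance (num : Int) (out : List Int) : Decidable (Spec_prime_time num out) := by unfold Spec_prime_time; infer_instance

-- ===== CLAIM (what is proved, stated in full; the proofs are below) =====
def Claim_equal_prime_time : Prop := ∀ (num : Int), Dom_prime_time num → Spec_prime_time num (prime_time num)

-- ===== LEMMAS AND PROOFS =====

-- the Bool form of A's loop test
def pvCop (n : Int) : Bool := decide (PySem.Int.mod n 2 ≠ 0 ∧ PySem.Int.mod n 3 ≠ 0)

theorem pvCop_iff (n : Int) : pvCop n = true ↔ (n % 2 ≠ 0 ∧ n % 3 ≠ 0) := by
  simp [pvCop, PySem.Int.mod_eq_emod_of_pos]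

-- one block of six: the filtered range (6k-1)..num starts with 6k-1, then 6k+1 if present,
-- then the filtered range from 6k+5
theorem pvBlock (num k : Int) (h : 6 * k - 1 ≤ num) :
    (PySem.List.pyRange (6 * k - 1) (num + 1) 1).filter pvCop =
      [6 * k - 1] ++ (if 6 * k + 1 ≤ num then [6 * k + 1] else []) ++
        (PySem.List.pyRange (6 * k + 5) (num + 1) 1).filter pvCop := by
  by_cases hbig : 6 * k + 4 ≤ num
  · rw [PySem.List.pyRange_one_append (6 * k - 1) (6 * k + 5) (num + 1) (by omega) (by omega)]
    have e : PySem.List.pyRange (6 * k - 1) (6 * k + 5) 1 =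
        [6*k-1, 6*k, 6*k+1, 6*k+2, 6*k+3, 6*k+4] := by
      rw [PySem.List.pyRange_one_cons (by omega)]
      rw [show (6*k-1+1 : Int) = 6*k by ring, PySem.List.pyRange_one_cons (by omega)]
      rw [show (6*k+1 : Int) = 6*k+1 by ring, PySem.List.pyRange_one_cons (by omega)]
      rw [show (6*k+1+1 : Int) = 6*k+2 by ring, PySem.List.pyRange_one_cons (by omega)]
      rw [show (6*k+2+1 : Int) = 6*k+3 by ring, PySem.List.pyRange_one_cons (by omega)]
      rw [show (6*k+3+1 : Int) = 6*k+4 by ring, PySem.List.pyRange_one_cons (by omega)]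
      rw [show (6*k+4+1 : Int) = 6*k+5 by ring, PySem.List.pyRange_one_eq_nil (by omega)]
    rw [e, List.filter_append]
    have c1 : pvCop (6*k-1) = true := (pvCop_iff _).mpr (by omega)
    have c2 : pvCop (6*k) = false := by
      cases h' : pvCop (6*k) with
      | true => exact absurd ((pvCop_iff _).mp h').1 (by omega)
      | false => rfl
    have c3 : pvCop (6*k+1) = true := (pvCop_iff _).mpr (by omega)
    have c4 : pvCop (6*k+2) = false := by
      cases h' : pvCop (6*k+2) with
      | true => exact absurd ((pvCop_iff _).mp h').1 (by omega)
      | false => rfl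
    have c5 : pvCop (6*k+3) = false := by
      cases h' : pvCop (6*k+3) with
      | true => exact absurd ((pvCop_iff _).mp h').2 (by omega)
      | false => rfl
    have c6 : pvCop (6*k+4) = false := by
      cases h' : pvCop (6*k+4) with
      | true => exact absurd ((pvCop_iff _).mp h').1 (by omega)
      | false => rfl
    simp [c1, c2, c3, c4, c5, c6]
    rw [if_pos (by omega : 6 * k < num)]
    simp
  · -- short final block: 6k-1 ≤ num ≤ 6k+3
    have htail : PySem.List.pyRange (6 * k + 5) (num + 1) 1 = [] :=
      PySem.List.pyRange_one_eq_nil (by omega)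
    have c1 : pvCop (6*k-1) = true := (pvCop_iff _).mpr (by omega)
    have c3 : pvCop (6*k+1) = true := (pvCop_iff _).mpr (by omega)
    have hcase : num = 6*k-1 ∨ num = 6*k ∨ num = 6*k+1 ∨ num = 6*k+2 ∨ num = 6*k+3 := by omega
    rcases hcase with h5 | h5 | h5 | h5 | h5 <;> subst h5
    · rw [show (6*k-1+1 : Int) = 6*k by ring,
          PySem.List.pyRange_one_cons (by omega : (6*k-1:Int) < 6*k),
          PySem.List.pyRange_one_eq_nil (by omega)]
      simp [c1]
    · rw [PySem.List.pyRange_one_cons (by omega : (6*k-1:Int) < 6*k+1),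
          show (6*k-1+1 : Int) = 6*k by ring,
          PySem.List.pyRange_one_cons (by omega : (6*k:Int) < 6*k+1),
          PySem.List.pyRange_one_eq_nil (by omega)]
      have c2 : pvCop (6*k) = false := by
        cases h' : pvCop (6*k) with
        | true => exact absurd ((pvCop_iff _).mp h').1 (by omega)
        | false => rfl
      simp [htail, c1, c2]
    · rw [PySem.List.pyRange_one_cons (by omega : (6*k-1:Int) < 6*k+1+1),
          show (6*k-1+1 : Int) = 6*k by ring,
          PySem.List.pyRange_one_cons (by omega : (6*k:Int) < 6*k+1+1),
          PySem.List.pyRange_one_cons (by omega : (6*k:Int)+1 < 6*k+1+1),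
          PySem.List.pyRange_one_eq_nil (by omega)]
      have c2 : pvCop (6*k) = false := by
        cases h' : pvCop (6*k) with
        | true => exact absurd ((pvCop_iff _).mp h').1 (by omega)
        | false => rfl
      simp [htail, c1, c2, c3]
    · rw [PySem.List.pyRange_one_cons (by omega : (6*k-1:Int) < 6*k+2+1),
          show (6*k-1+1 : Int) = 6*k by ring,
          PySem.List.pyRange_one_cons (by omega : (6*k:Int) < 6*k+2+1),
          PySem.List.pyRange_one_cons (by omega : (6*k:Int)+1 < 6*k+2+1),
          show (6*k+1+1 : Int) = 6*k+2 by ring,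
          PySem.List.pyRange_one_cons (by omega : (6*k:Int)+2 < 6*k+2+1),
          PySem.List.pyRange_one_eq_nil (by omega)]
      have c2 : pvCop (6*k) = false := by
        cases h' : pvCop (6*k) with
        | true => exact absurd ((pvCop_iff _).mp h').1 (by omega)
        | false => rfl
      have c4 : pvCop (6*k+2) = false := by
        cases h' : pvCop (6*k+2) with
        | true => exact absurd ((pvCop_iff _).mp h').1 (by omega)
        | false => rfl
      simp [htail, c1, c2, c3, c4]
    · rw [PySem.List.pyRange_one_cons (by omega : (6*k-1:Int) < 6*k+3+1),
          show (6*k-1+1 : Int) = 6*k by ring,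
          PySem.List.pyRange_one_cons (by omega : (6*k:Int) < 6*k+3+1),
          PySem.List.pyRange_one_cons (by omega : (6*k:Int)+1 < 6*k+3+1),
          show (6*k+1+1 : Int) = 6*k+2 by ring,
          PySem.List.pyRange_one_cons (by omega : (6*k:Int)+2 < 6*k+3+1),
          show (6*k+2+1 : Int) = 6*k+3 by ring,
          PySem.List.pyRange_one_cons (by omega : (6*k:Int)+3 < 6*k+3+1),
          PySem.List.pyRange_one_eq_nil (by omega)]
      have c2 : pvCop (6*k) = false := by
        cases h' : pvCop (6*k) with
        | true => exact absurd ((pvCop_iff _).mp h').1 (by omega)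
        | false => rfl
      have c4 : pvCop (6*k+2) = false := by
        cases h' : pvCop (6*k+2) with
        | true => exact absurd ((pvCop_iff _).mp h').1 (by omega)
        | false => rfl
      have c5 : pvCop (6*k+3) = false := by
        cases h' : pvCop (6*k+3) with
        | true => exact absurd ((pvCop_iff _).mp h').2 (by omega)
        | false => rfl
      simp [htail, c1, c2, c3, c4, c5]

-- B's loop produces the filter of the range from 6k-1
theorem pvLoop_eq (n : Nat) : ∀ (num k : Int) (acc : List Int),
    num + 1 - (6 * k - 1) ≤ (n : Int) →
    primeLoop num k acc = acc ++ (PySem.List.pyRange (6 * k - 1) (num + 1) 1).filter pvCop := by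
  induction n with
  | zero =>
    intro num k acc h
    rw [primeLoop, if_neg (by omega), PySem.List.pyRange_one_eq_nil (by omega)]
    simp
  | succ n ih =>
    intro num k acc h
    by_cases hle : 6 * k - 1 ≤ num
    · rw [primeLoop, if_pos hle,
          ih num (k + 1) _ (by omega),
          pvBlock num k hle]
      simp [show (6 * (k+1) - 1 : Int) = 6*k+5 by ring]
    · rw [primeLoop, if_neg hle, PySem.List.pyRange_one_eq_nil (by omega)]
      simp

-- the first three candidates 2,3,4 of A's scan all fail the test
theorem pvHead_filter (num : Int) :
    (PySem.List.pyRange 2 (num + 1) 1).filter pvCop =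
      (PySem.List.pyRange 5 (num + 1) 1).filter pvCop := by
  by_cases h4 : 4 ≤ num
  · rw [PySem.List.pyRange_one_append 2 5 (num + 1) (by omega) (by omega), List.filter_append]
    have e : PySem.List.pyRange 2 5 1 = [2, 3, 4] := by
      rw [PySem.List.pyRange_one_cons (by norm_num), PySem.List.pyRange_one_cons (by norm_num),
          PySem.List.pyRange_one_cons (by norm_num), PySem.List.pyRange_one_eq_nil (by norm_num)]
      norm_num
    rw [e]
    simp [pvCop, PySem.Int.mod]
  · have h5 : PySem.List.pyRange 5 (num + 1) 1 = [] := PySem.List.pyRange_one_eq_nil (by omega)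
    rw [h5]
    have hcase : num + 1 ≤ 2 ∨ num = 2 ∨ num = 3 := by omega
    rcases hcase with h | h | h
    · rw [PySem.List.pyRange_one_eq_nil (by omega)]
    · subst h
      rw [PySem.List.pyRange_one_cons (by norm_num), PySem.List.pyRange_one_eq_nil (by norm_num)]
      simp [pvCop, PySem.Int.mod]
    · subst h
      rw [PySem.List.pyRange_one_cons (by norm_num), PySem.List.pyRange_one_cons (by norm_num),
          PySem.List.pyRange_one_eq_nil (by norm_num)]
      simp [pvCop, PySem.Int.mod]

-- ===== VERDICT (by name: the statement is the Claim_ definition above) =====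
theorem prime_time_spec : Claim_equal_prime_time := by
  intro num _
  unfold Spec_prime_time prime_time prime_time_alt
  rw [PySem.List.foldl_append_ite_eq_filter]
  rw [pvLoop_eq (num + 1 - 5).toNat num 1 _ (by omega)]
  rw [show (6 * 1 - 1 : Int) = 5 by norm_num]
  rw [show (fun x => decide (PySem.Int.mod x 2 ≠ 0 ∧ PySem.Int.mod x 3 ≠ 0)) = pvCop from rfl]
  rw [pvHead_filter]
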